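-- pv_equiv track=rewrite | github.com/QuitoTactico/PYTHON | Basics UNAL-NACHO/Basics_3/a3_4.py | f
-- ===== SOURCE A (Python) =====
-- def f(l: list):
--     c, cl, cr = 0, 0, 0
--     for i in range(1, len(l)):
--         for n in range(0, i):
--             cl += l[n]
--         for m in range(i, len(l)):
--             cr += l[m]
--         if cl == cr:
--             c += 1
--         cl, cr = 0, 0
--     return c
-- ===== SOURCE B (Python) =====
-- def f(l: list):
--     total = sum(l)
--     c = 0
--     left = 0
--     for x in l[:-1]:
--         left += x
--         if left * 2 == total:
--             c += 1
--     return c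
-- ===== Notes on version B (the rewrite author's own statement) =====
-- stated objective: faster
-- what changed: Replaces the per-index recomputation of both side sums (two inner loops per split point) with a single pass that keeps a running prefix sum and compares it against the precomputed total via left*2 == total.
import Mathlib
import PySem

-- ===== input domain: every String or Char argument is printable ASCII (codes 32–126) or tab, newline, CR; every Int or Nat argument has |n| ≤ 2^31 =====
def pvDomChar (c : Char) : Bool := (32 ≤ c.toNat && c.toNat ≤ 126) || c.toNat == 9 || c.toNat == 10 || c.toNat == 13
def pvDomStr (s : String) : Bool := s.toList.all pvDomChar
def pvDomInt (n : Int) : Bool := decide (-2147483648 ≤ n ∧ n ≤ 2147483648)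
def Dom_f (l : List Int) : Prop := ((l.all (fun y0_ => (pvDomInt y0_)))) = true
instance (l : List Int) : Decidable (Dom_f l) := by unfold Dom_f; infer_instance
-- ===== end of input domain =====

-- B replaces A's two inner sum loops per split point with one pass keeping a running
-- prefix sum compared against the precomputed total.

-- ===== PORT A =====
-- literal transliteration of A: for each i in range(1, len(l)) recompute cl = sum of
-- l[0:i] and cr = sum of l[i:len(l)] by index loops, count the splits with cl == cr.
def f (l : List Int) : Int :=
  (PySem.List.pyRange 1 (PySem.List.len l) 1).foldl
    (fun c i =>
      let cl := (PySem.List.pyRange 0 i 1).foldl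
        (fun s k => s + PySem.List.pyGetD l k 0) 0
      let cr := (PySem.List.pyRange i (PySem.List.len l) 1).foldl
        (fun s m => s + PySem.List.pyGetD l m 0) 0
      if cl = cr then c + 1 else c) 0

-- ===== PORT B =====
-- literal transliteration of B: total = sum(l); one pass over l[:-1] with running
-- left sum, counting positions where left * 2 == total.
def f_alt (l : List Int) : Int :=
  let total := l.sum
  ((PySem.List.slice l none (some (-1))).foldl
    (fun (st : Int × Int) x =>
      let left := st.1 + x
      (left, if left * 2 = total then st.2 + 1 else st.2)) (0, 0)).2

-- ===== PRECONDITION & SPEC =====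
def Spec_f (l : List Int) (out : Int) : Prop := out = f_alt l
instance (l : List Int) (out : Int) : Decidable (Spec_f l out) := by unfold Spec_f; infer_instance

-- ===== CLAIM (what is proved, stated in full; the proofs are below) =====
def Claim_equal_f : Prop := ∀ (l : List Int), Dom_f l → Spec_f l (f l)

-- ===== LEMMAS AND PROOFS =====

-- A's first inner loop sums the prefix l[0:j].
lemma clfold_eq (l : List Int) (j : Nat) (hj : j ≤ l.length) :
    (PySem.List.pyRange 0 (j : Int) 1).foldl (fun s k => s + PySem.List.pyGetD l k 0) 0
      = (l.take j).sum := by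
  induction j with
  | zero => simp [PySem.List.pyRange_one_eq_nil]
  | succ j ih =>
    have h1 : ((j : Int) + 1) = ((j + 1 : Nat) : Int) := by push_cast; ring
    have h2 : (0 : Int) ≤ (j : Int) := by positivity
    rw [← h1, PySem.List.pyRange_one_succ_right h2, List.foldl_append,
      ih (by omega)]
    have hjlt : j < l.length := by omega
    simp [PySem.List.pyGetD_natCast, List.getD_eq_getElem?_getD,
      List.getElem?_eq_getElem hjlt, List.sum_take_succ l j hjlt]

-- A's second inner loop sums the suffix l[i:].
lemma crfold_eq (l : List Int) (i : Int) (hi : 0 ≤ i) :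
    (PySem.List.pyRange i (PySem.List.len l) 1).foldl
        (fun s m => s + PySem.List.pyGetD l m 0) 0
      = (l.drop i.toNat).sum := by
  rw [PySem.List.foldl_pyRange_pyGetD l 0 (fun s x => s + x) 0 hi,
    PySem.List.foldl_add _ (fun x => x) 0]
  simp

-- B's loop counted against prefixes of its remaining input.
lemma bloop_eq (total : Int) (xs : List Int) (left c : Int) :
    (xs.foldl (fun (st : Int × Int) x =>
        (st.1 + x, if (st.1 + x) * 2 = total then st.2 + 1 else st.2)) (left, c)).2
      = c + ((List.range xs.length).countP
          (fun k => decide ((left + (xs.take (k + 1)).sum) * 2 = total)) : Int) := by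
  induction xs generalizing left c with
  | nil => simp
  | cons x xs ih =>
    rw [List.foldl_cons, ih]
    rw [List.length_cons, List.range_succ_eq_map, List.countP_cons, List.countP_map]
    have hcong : ∀ k ∈ List.range xs.length,
        (decide (((left, c).1 + x + (xs.take (k + 1)).sum) * 2 = total)) = true ↔
          ((fun k => decide ((left + ((x :: xs).take (k + 1)).sum) * 2 = total)) ∘ Nat.succ) k = true := by
      intro k _
      simp only [Function.comp, List.take_succ_cons, List.sum_cons, decide_eq_true_eq]
      constructor <;> intro h <;> linarith
    rw [List.countP_congr hcong]
    by_cases h : (left + x) * 2 = total <;> simp [h] <;> ring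

-- the common closed description both loops are reduced to
lemma countP_bridge (l : List Int) :
    ((PySem.List.pyRange 1 (l.length : Int) 1).countP
        (fun i => decide ((l.take i.toNat).sum = (l.drop i.toNat).sum)) : Nat)
      = ((List.range l.dropLast.length).countP
          (fun k => decide ((0 + (l.dropLast.take (k + 1)).sum) * 2 = l.sum)) : Nat) := by
  rw [PySem.List.pyRange_one, List.countP_map, List.length_dropLast]
  have hlen : ((l.length : Int) - 1).toNat = l.length - 1 := by omega
  rw [hlen]
  apply List.countP_congr
  intro k hk
  rw [List.mem_range] at hk
  have h1 : ((1 : Int) + (k : Int)).toNat = k + 1 := by omega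
  have htake : l.dropLast.take (k + 1) = l.take (k + 1) := by
    rw [List.dropLast_eq_take, List.take_take]
    congr 1
    omega
  have hsum : (l.take (k + 1)).sum + (l.drop (k + 1)).sum = l.sum := by
    conv_rhs => rw [← List.take_append_drop (k + 1) l]
    rw [List.sum_append]
  simp only [Function.comp, h1, htake, zero_add, decide_eq_true_eq]
  constructor <;> intro h <;> linarith

-- ===== VERDICT (by name: the statement is the Claim_ definition above) =====
theorem f_spec : Claim_equal_f := by
  intro l _
  unfold Spec_f f f_alt
  rw [PySem.List.slice_to_neg_one, bloop_eq]
  have hcong : ∀ (c : Int), ∀ i ∈ PySem.List.pyRange 1 (PySem.List.len l) 1,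
      (fun c i =>
        let cl := (PySem.List.pyRange 0 i 1).foldl (fun s k => s + PySem.List.pyGetD l k 0) 0
        let cr := (PySem.List.pyRange i (PySem.List.len l) 1).foldl (fun s m => s + PySem.List.pyGetD l m 0) 0
        if cl = cr then c + 1 else c) c i
      = (fun c i => if (l.take i.toNat).sum = (l.drop i.toNat).sum then c + 1 else c) c i := by
    intro c i hi
    rw [PySem.List.mem_pyRange_one] at hi
    have hi0 : (0 : Int) ≤ i := le_trans (by norm_num) hi.1
    have hix : ((i.toNat : Nat) : Int) = i := Int.toNat_of_nonneg hi0
    have hle : i.toNat ≤ l.length := by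
      have h2 := hi.2
      rw [PySem.List.len_eq] at h2
      omega
    simp only
    rw [crfold_eq l i hi0, ← hix, clfold_eq l i.toNat hle]
    simp only [Int.toNat_natCast]
    rfl
  rw [PySem.List.foldl_congr_mem _ _ _ _ hcong]
  rw [PySem.List.foldl_ite_add_one (fun i : Int => (l.take i.toNat).sum = (l.drop i.toNat).sum) _ 0]
  have hb := countP_bridge l
  simp only [zero_add] at hb
  simp only [PySem.List.len_eq, zero_add]
  exact_mod_cast hb
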